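-- pv_equiv track=rewrite | github.com/lhysgithub/UAC-AD | codes/common/data_processing_utils.py | find_positive_segment
-- ===== SOURCE A (Python) =====
-- def find_positive_segment(data):
--     dataset_len = int(len(data))
--     index_list = []
--     lens_list = []
--     find = 0
--     count = 0
--     for i in range(len(data)):
--         if int(data[i]) == 1:
--             if find == 0:
--                 index_list.append(i)
--             find = 1
--             count += 1
--         elif find == 1:
--             find = 0
--             lens_list.append(count)
--             count = 0
--     if find == 1:
--         find = 0
--         lens_list.append(count)
--         count = 0
--     return index_list, lens_list
-- ===== SOURCE B (Python) =====
-- def find_positive_segment(data):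
--     index_list = []
--     lens_list = []
--     pos = 0
--     n = len(data)
--     while pos < n:
--         is_one = int(data[pos]) == 1
--         end = pos + 1
--         while end < n and (int(data[end]) == 1) == is_one:
--             end += 1
--         if is_one:
--             index_list.append(pos)
--             lens_list.append(end - pos)
--         pos = end
--     return index_list, lens_list
-- ===== Notes on version B (the rewrite author's own statement) =====
-- stated objective: alternative
-- what changed: Replaces A's per-element find/count flag state machine with a two-pointer run scan: each maximal run of equal key (== 1 or not) is located at once, and for runs of ones the start index and run length are emitted directly.
import Mathlib
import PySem

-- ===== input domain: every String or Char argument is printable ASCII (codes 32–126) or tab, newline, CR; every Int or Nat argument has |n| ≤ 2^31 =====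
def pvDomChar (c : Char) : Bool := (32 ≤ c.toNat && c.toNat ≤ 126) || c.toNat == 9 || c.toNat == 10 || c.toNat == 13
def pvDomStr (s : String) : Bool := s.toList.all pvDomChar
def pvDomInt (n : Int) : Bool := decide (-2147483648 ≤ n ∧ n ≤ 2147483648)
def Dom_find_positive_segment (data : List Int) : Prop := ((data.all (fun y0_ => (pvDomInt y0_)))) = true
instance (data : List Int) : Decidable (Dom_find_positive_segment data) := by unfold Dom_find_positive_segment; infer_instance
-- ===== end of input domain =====

-- B replaces A's per-element flag/counter state machine by a two-pointer run scan (alternative decomposition, same cost).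

-- ===== PORT A =====
-- A's loop over range(len(data)) with state (find, count) and accumulated index_list / lens_list,
-- transliterated as structural recursion over the list carrying the index i.
def findPosSegA (i find count : Int) (idx lens : List Int) : List Int → List Int × List Int
  | [] => if find == 1 then (idx, lens ++ [count]) else (idx, lens)
  | x :: rest =>
    if x == 1 then
      findPosSegA (i + 1) 1 (count + 1) (if find == 0 then idx ++ [i] else idx) lens rest
    else if find == 1 then
      findPosSegA (i + 1) 0 0 idx (lens ++ [count]) rest
    else
      findPosSegA (i + 1) find count idx lens rest

def find_positive_segment (data : List Int) : List Int × List Int :=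
  let _dataset_len : Int := data.length   -- A computes int(len(data)) and never uses it
  findPosSegA 0 0 0 [] [] data

-- ===== PORT B =====
-- Source B's outer while loop: at each run start at position pos, the inner while loop scans to the
-- end of the maximal run of equal key (element == 1 or not); takeWhile/dropWhile realise that
-- inner scan, and runs of ones emit (pos, run length).
def findPosSegB (pos : Int) : List Int → List Int × List Int
  | [] => ([], [])
  | x :: rest =>
    let isOne := x == 1
    let t := rest.takeWhile (fun y => (y == 1) == isOne)
    let d := rest.dropWhile (fun y => (y == 1) == isOne)
    let len : Int := 1 + (t.length : Int)
    let r := findPosSegB (pos + len) d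
    if isOne then (pos :: r.1, len :: r.2) else r
termination_by xs => xs.length
decreasing_by
  exact Nat.lt_succ_of_le (List.length_dropWhile_le _ _)

def find_positive_segment_alt (data : List Int) : List Int × List Int :=
  findPosSegB 0 data

-- ===== PRECONDITION & SPEC =====
def Spec_find_positive_segment (data : List Int) (out : List Int × List Int) : Prop := out = find_positive_segment_alt data
instance (data : List Int) (out : List Int × List Int) : Decidable (Spec_find_positive_segment data out) := by unfold Spec_find_positive_segment; infer_instance

-- ===== CLAIM (what is proved, stated in full; the proofs are below) =====
def Claim_equal_find_positive_segment : Prop := ∀ (data : List Int), Dom_find_positive_segment data → Spec_find_positive_segment data (find_positive_segment data)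

-- ===== LEMMAS AND PROOFS =====

-- Skipping a non-1 head only advances B's position counter.
lemma findPosSegB_skip (pos x : Int) (rest : List Int) (hx : (x == 1) = false) :
    findPosSegB pos (x :: rest) = findPosSegB (pos + 1) rest := by
  cases rest with
  | nil => simp [findPosSegB, hx]
  | cons z rs =>
    by_cases hz : (z == 1) = true
    · simp [findPosSegB, hx, hz]
    · simp only [Bool.not_eq_true] at hz
      conv_lhs => rw [findPosSegB]
      conv_rhs => rw [findPosSegB]
      simp [hx, hz, List.takeWhile, List.dropWhile]
      congr 1
      ring

-- Combined invariant for A's loop: state find = 0 between runs, and state (find = 1, count = c)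
-- after consuming c ones of the current run, both expressed through B's run scan.
lemma findPosSegA_main : ∀ n (xs : List Int), xs.length ≤ n →
    (∀ (pos : Int) (idx lens : List Int),
      findPosSegA pos 0 0 idx lens xs = (idx ++ (findPosSegB pos xs).1, lens ++ (findPosSegB pos xs).2)) ∧
    (∀ (pos c : Int) (idx lens : List Int),
      findPosSegA pos 1 c idx lens xs =
        (idx ++ (findPosSegB (pos + (xs.takeWhile (fun y => y == 1)).length) (xs.dropWhile (fun y => y == 1))).1,
         lens ++ (c + (xs.takeWhile (fun y => y == 1)).length) ::
           (findPosSegB (pos + (xs.takeWhile (fun y => y == 1)).length) (xs.dropWhile (fun y => y == 1))).2)) := by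
  intro n
  induction n with
  | zero =>
    intro xs hl
    rw [List.length_eq_zero_iff.mp (Nat.le_zero.mp hl)]
    constructor
    · intro pos idx lens; simp [findPosSegA, findPosSegB]
    · intro pos c idx lens; simp [findPosSegA, findPosSegB]
  | succ n IH =>
    intro xs hl
    cases xs with
    | nil =>
      constructor
      · intro pos idx lens; simp [findPosSegA, findPosSegB]
      · intro pos c idx lens; simp [findPosSegA, findPosSegB]
    | cons x rest =>
      have h : rest.length ≤ n := Nat.le_of_succ_le_succ hl
      constructor
      · intro pos idx lens
        by_cases hx : (x == 1) = true
        · rw [findPosSegA, if_pos hx]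
          simp only [show ((0:Int) == 0) = true by decide, if_pos]
          rw [(IH rest h).2 (pos + 1) (0 + 1) (idx ++ [pos]) lens]
          conv_rhs => rw [findPosSegB]
          simp [hx, List.append_assoc]
          rw [add_assoc]
          exact ⟨rfl, rfl⟩
        · simp only [Bool.not_eq_true] at hx
          rw [findPosSegA, if_neg (by simp [hx]),
              if_neg (by decide)]
          rw [findPosSegB_skip pos x rest hx]
          exact (IH rest h).1 (pos + 1) idx lens
      · intro pos c idx lens
        by_cases hx : (x == 1) = true
        · rw [findPosSegA, if_pos hx]
          simp only [show ((1:Int) == 0) = false by decide, if_neg, Bool.false_eq_true,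
            not_false_iff]
          rw [(IH rest h).2 (pos + 1) (c + 1) idx lens]
          simp only [List.takeWhile, List.dropWhile, hx]
          simp
          have harr : pos + 1 + ((List.takeWhile (fun y => y == 1) rest).length : Int) =
              pos + (((List.takeWhile (fun y => y == 1) rest).length : Int) + 1) := by ring
          rw [harr]
          exact ⟨rfl, by ring, rfl⟩
        · simp only [Bool.not_eq_true] at hx
          rw [findPosSegA, if_neg (by simp [hx]), if_pos (by decide)]
          rw [(IH rest h).1 (pos + 1) idx (lens ++ [c])]
          simp only [List.takeWhile, List.dropWhile, hx, List.length_nil, Nat.cast_zero,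
            add_zero]
          rw [findPosSegB_skip pos x rest hx]
          simp

-- ===== VERDICT (by name: the statement is the Claim_ definition above) =====
theorem find_positive_segment_spec : Claim_equal_find_positive_segment := by
  intro data _
  unfold Spec_find_positive_segment find_positive_segment find_positive_segment_alt
  simpa using (findPosSegA_main data.length data le_rfl).1 0 [] []
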